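-- pv_equiv track=rewrite | github.com/pypi-data/pypi-mirror-401 | packages/regscale-cli/regscale_cli-6.29.4.12-py3-none-any.whl/regscale/integrations/commercial/aws/audit_manager_compliance.py | _get_compliance_check_from_resources
-- ===== SOURCE A (Python) =====
-- from typing import Any, Dict, List, Optional
--
-- def _get_compliance_check_from_resources(resources_included: List[Dict[str, Any]]) -> Optional[str]:
--     """
--     Determine compliance check status from resource-level checks.
--
--     :param List[Dict[str, Any]] resources_included: List of resources with complianceCheck fields
--     :return: Aggregated compliance check status or None
--     :rtype: Optional[str]
--     """
--     if not resources_included: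
--         return None
--
--     resource_checks = [r.get("complianceCheck") for r in resources_included]
--     if "FAILED" in resource_checks:
--         return "FAILED"
--     if any(check == "COMPLIANT" for check in resource_checks):
--         return "COMPLIANT"
--     if any(check == "NOT_APPLICABLE" for check in resource_checks):
--         return "NOT_APPLICABLE"
--     return None
-- ===== SOURCE B (Python) =====
-- from typing import Any, Dict, List, Optional
--
-- def _get_compliance_check_from_resources(resources_included: List[Dict[str, Any]]) -> Optional[str]:
--     """Single pass: return FAILED immediately, otherwise remember what was seen."""
--     has_compliant = False
--     has_na = False
--     for r in resources_included:
--         c = r.get("complianceCheck")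
--         if c == "FAILED":
--             return "FAILED"
--         if c == "COMPLIANT":
--             has_compliant = True
--         elif c == "NOT_APPLICABLE":
--             has_na = True
--     return "COMPLIANT" if has_compliant else "NOT_APPLICABLE" if has_na else None
-- ===== Notes on version B (the rewrite author's own statement) =====
-- stated objective: simpler
-- what changed: Replaces the intermediate checks list and three separate scans with one pass that early-returns on FAILED and tracks COMPLIANT/NOT_APPLICABLE flags; the empty-list guard disappears because the loop yields None naturally.
import Mathlib
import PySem

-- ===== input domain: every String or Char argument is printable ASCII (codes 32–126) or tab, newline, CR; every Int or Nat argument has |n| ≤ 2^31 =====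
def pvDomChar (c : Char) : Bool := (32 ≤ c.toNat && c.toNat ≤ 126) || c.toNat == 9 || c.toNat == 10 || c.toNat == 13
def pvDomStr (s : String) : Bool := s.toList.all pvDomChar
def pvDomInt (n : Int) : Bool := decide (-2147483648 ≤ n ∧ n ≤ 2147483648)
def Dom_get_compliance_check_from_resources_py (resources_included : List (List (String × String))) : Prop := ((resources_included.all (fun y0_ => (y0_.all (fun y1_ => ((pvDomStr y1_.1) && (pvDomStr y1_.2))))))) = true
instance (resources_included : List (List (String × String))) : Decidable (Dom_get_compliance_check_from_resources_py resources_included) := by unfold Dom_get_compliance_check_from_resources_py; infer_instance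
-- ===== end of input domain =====

-- ===== PORT A =====
-- B merges A's three scans into one early-exit pass; objective: simpler (no intermediate list).
def get_compliance_check_from_resources_py (resources_included : List (List (String × String))) : Option String :=
  if resources_included = [] then none
  else
    let resource_checks := resources_included.map (fun r => (PySem.Dict.mk r).get? "complianceCheck")
    if resource_checks.contains (some "FAILED") then some "FAILED"
    else if resource_checks.any (fun check => check == some "COMPLIANT") then some "COMPLIANT"
    else if resource_checks.any (fun check => check == some "NOT_APPLICABLE") then some "NOT_APPLICABLE"
    else none

-- ===== PORT B =====
def pvAltLoop : List (List (String × String)) → Bool → Bool → Option String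
  | [], has_compliant, has_na =>
      if has_compliant then some "COMPLIANT"
      else if has_na then some "NOT_APPLICABLE" else none
  | r :: rest, has_compliant, has_na =>
      let c := (PySem.Dict.mk r).get? "complianceCheck"
      if c == some "FAILED" then some "FAILED"
      else if c == some "COMPLIANT" then pvAltLoop rest true has_na
      else if c == some "NOT_APPLICABLE" then pvAltLoop rest has_compliant true
      else pvAltLoop rest has_compliant has_na

def get_compliance_check_from_resources_py_alt (resources_included : List (List (String × String))) : Option String :=
  pvAltLoop resources_included false false

-- ===== PRECONDITION & SPEC =====
def Spec_get_compliance_check_from_resources_py (resources_included : List (List (String × String))) (out : Option String) : Prop := out = get_compliance_check_from_resources_py_alt resources_included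
instance (resources_included : List (List (String × String))) (out : Option String) : Decidable (Spec_get_compliance_check_from_resources_py resources_included out) := by unfold Spec_get_compliance_check_from_resources_py; infer_instance

-- ===== CLAIM =====
def Claim_equal_get_compliance_check_from_resources_py : Prop := ∀ (resources_included : List (List (String × String))), Dom_get_compliance_check_from_resources_py resources_included → Spec_get_compliance_check_from_resources_py resources_included (get_compliance_check_from_resources_py resources_included)

-- ===== LEMMAS AND PROOFS =====
theorem pvAltLoop_eq (rs : List (List (String × String))) :
    ∀ (hc hn : Bool),
      pvAltLoop rs hc hn =
        (let checks := rs.map (fun r => (PySem.Dict.mk r).get? "complianceCheck")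
         if checks.contains (some "FAILED") then some "FAILED"
         else if hc || checks.any (fun check => check == some "COMPLIANT") then some "COMPLIANT"
         else if hn || checks.any (fun check => check == some "NOT_APPLICABLE") then some "NOT_APPLICABLE"
         else none) := by
  induction rs with
  | nil => intro hc hn; simp [pvAltLoop]
  | cons r rest ih =>
    intro hc hn
    simp only [pvAltLoop, List.map_cons, List.contains_cons, List.any_cons, ih]
    by_cases h1 : (PySem.Dict.mk r).get? "complianceCheck" = some "FAILED"
    · simp [h1]
    · by_cases h2 : (PySem.Dict.mk r).get? "complianceCheck" = some "COMPLIANT"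
      · simp [h1, Ne.symm h1, h2]
      · by_cases h3 : (PySem.Dict.mk r).get? "complianceCheck" = some "NOT_APPLICABLE"
        · simp [h1, Ne.symm h1, h2, h3]
        · simp [h1, Ne.symm h1, h2, h3]

-- ===== VERDICT =====
theorem get_compliance_check_from_resources_py_spec : Claim_equal_get_compliance_check_from_resources_py := by
  intro rs _
  unfold Spec_get_compliance_check_from_resources_py
  unfold get_compliance_check_from_resources_py get_compliance_check_from_resources_py_alt
  rw [pvAltLoop_eq]
  cases rs with
  | nil => simp
  | cons r rest => simp
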